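-- pv_equiv track=rewrite | github.com/s1366560/agi-demos | src/infrastructure/agent/tools/plan_update.py | _update_section
-- ===== SOURCE A (Python) =====
-- def _update_section(
--
--     content: str,
--     section_name: str,
--     new_section_content: str,
-- ) -> str:
--     """
--     Update a specific section in the Markdown content.
--
--     Args:
--         content: Full Markdown content
--         section_name: Section header to find (e.g., "## 架构设计")
--         new_section_content: New content for the section
--
--     Returns:
--         Updated content with the section replaced
--     """
--     lines = content.split("\n")
--     result_lines = []
--     in_target_section = False
--     section_found = False
--     target_level = 0
--
--     for line in lines:
--         # Check if this is a header line
--         if line.startswith("#"):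
--             # Count the level (number of #)
--             level = len(line) - len(line.lstrip("#"))
--             header_text = line.lstrip("#").strip()
--
--             if in_target_section:
--                 # Check if we've reached the end of the target section
--                 if level <= target_level:
--                     # End of target section, insert new content
--                     result_lines.append(new_section_content.rstrip())
--                     result_lines.append("")
--                     in_target_section = False
--                     result_lines.append(line)
--                 # Skip lines in target section (will be replaced)
--                 continue
--             elif section_name.lower() in header_text.lower():
--                 # Found the target section
--                 section_found = True
--                 in_target_section = True
--                 target_level = level
--                 result_lines.append(line)
--                 continue
--
--         if in_target_section:
--             # Skip lines in target section (will be replaced)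
--             continue
--
--         result_lines.append(line)
--
--     # Handle case where target section is at the end
--     if in_target_section:
--         result_lines.append(new_section_content.rstrip())
--
--     # Handle case where section was not found - append new section
--     if not section_found:
--         result_lines.append("")
--         result_lines.append(f"## {section_name}")
--         result_lines.append(new_section_content.rstrip())
--
--     return "\n".join(result_lines)
-- ===== SOURCE B (Python) =====
-- def _level(line):
--     return len(line) - len(line.lstrip("#"))
--
--
-- def _matches(line, section_name):
--     if not line.startswith("#"):
--         return False
--     return section_name.lower() in line.lstrip("#").strip().lower()
--
--
-- def _update_section(
--     content: str,
--     section_name: str,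
--     new_section_content: str,
-- ) -> str:
--     lines = content.split("\n")
--     n = len(lines)
--     body = new_section_content.rstrip()
--     out = []
--     found = False
--     i = 0
--     while i < n:
--         line = lines[i]
--         if _matches(line, section_name):
--             found = True
--             out.append(line)
--             lvl = _level(line)
--             j = i + 1
--             while j < n and not (lines[j].startswith("#") and _level(lines[j]) <= lvl):
--                 j += 1
--             out.append(body)
--             if j < n:
--                 out.append("")
--                 out.append(lines[j])
--             i = j + 1
--         else:
--             out.append(line)
--             i += 1
--     if not found:
--         out.extend(["", "## " + section_name, body])
--     return "\n".join(out)
-- ===== Notes on version B (the rewrite author's own statement) =====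
-- stated objective: alternative
-- what changed: A's single pass with a four-variable state machine (in_target/found/target_level flags threaded through every line) is replaced by a two-level decomposition: an outer loop that, on a matching header, locates the section's closing header with an inner scan, emits the replacement block, and resumes after it.
import Mathlib
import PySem

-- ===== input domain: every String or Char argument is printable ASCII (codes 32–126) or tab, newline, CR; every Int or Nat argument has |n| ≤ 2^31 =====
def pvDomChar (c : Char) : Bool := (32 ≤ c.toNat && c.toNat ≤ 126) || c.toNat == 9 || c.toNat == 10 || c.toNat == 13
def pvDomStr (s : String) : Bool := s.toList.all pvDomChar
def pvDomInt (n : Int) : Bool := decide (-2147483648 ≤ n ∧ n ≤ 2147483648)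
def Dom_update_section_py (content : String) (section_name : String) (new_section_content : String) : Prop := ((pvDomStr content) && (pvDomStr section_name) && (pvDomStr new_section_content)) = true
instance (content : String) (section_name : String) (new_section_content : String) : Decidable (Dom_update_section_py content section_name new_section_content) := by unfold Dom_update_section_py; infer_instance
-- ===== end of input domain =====

-- B replaces A's four-variable state machine by a two-level decomposition (find the
-- closing header of a matched section, emit the replacement block, resume after it);
-- objective: alternative (clearer structure, same cost).

-- Shared line-level helpers: both Pythons compute these exact expressions on a line.
-- line.lstrip("#"): drops the leading run of '#' characters (exact: lstrip with a
-- single-char argument is dropWhile on that char).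
def pvLstripHash (cs : List Char) : List Char := cs.dropWhile (fun c => c == '#')

-- level = len(line) - len(line.lstrip("#"))
def pvLevel (line : String) : Nat := line.toList.length - (pvLstripHash line.toList).length

-- section_name.lower() in line.lstrip("#").strip().lower()
def pvMatch (line : String) (section_name : String) : Bool :=
  PySem.Chars.isIn (PySem.Chars.lower section_name.toList)
    (PySem.Chars.lower (PySem.Chars.strip (pvLstripHash line.toList)))

-- ===== PORT A =====
-- state = (result_lines, in_target_section, section_found, target_level)
def stepA (section_name : String) (new_section_content : String)
    (st : List String × Bool × Bool × Nat) (line : String) :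
    List String × Bool × Bool × Nat :=
  let res := st.1
  let inT := st.2.1
  let found := st.2.2.1
  let lvl0 := st.2.2.2
  if PySem.Str.startswith line "#" then
    if inT then
      if pvLevel line ≤ lvl0 then
        (res ++ [PySem.Str.rstrip new_section_content, "", line], false, found, lvl0)
      else (res, inT, found, lvl0)
    else if pvMatch line section_name then
      (res ++ [line], true, true, pvLevel line)
    else (res ++ [line], inT, found, lvl0)
  else if inT then (res, inT, found, lvl0)
  else (res ++ [line], inT, found, lvl0)

def update_section_py (content : String) (section_name : String) (new_section_content : String) : String :=
  -- content.split("\n"); the separator "\n" is non-empty so split? is always `some`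
  let lines := (PySem.Str.split? content "\n").getD []
  let st := lines.foldl (stepA section_name new_section_content) ([], false, false, 0)
  let res := if st.2.1 then st.1 ++ [PySem.Str.rstrip new_section_content] else st.1
  let res := if st.2.2.1 then res else res ++ ["", "## " ++ section_name, PySem.Str.rstrip new_section_content]
  PySem.Str.join "\n" res

-- ===== PORT B =====
-- inner while loop of Source B: drop lines until the first closing header
-- (a header whose level is ≤ lvl), returning the remaining suffix (lines[j:])
def dropToClose (lvl : Nat) : List String → List String
  | [] => []
  | l :: ls =>
      if PySem.Str.startswith l "#" && decide (pvLevel l ≤ lvl) then l :: ls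
      else dropToClose lvl ls

theorem length_dropToClose_le (lvl : Nat) (ls : List String) :
    (dropToClose lvl ls).length ≤ ls.length := by
  induction ls with
  | nil => simp [dropToClose]
  | cons l ls ih =>
      simp only [dropToClose]
      split
      · exact Nat.le_refl _
      · exact Nat.le_succ_of_le ih

-- outer while loop of Source B: returns (out, found)
def goB (section_name : String) (body : String) : List String → List String × Bool
  | [] => ([], false)
  | l :: ls =>
      if PySem.Str.startswith l "#" && pvMatch l section_name then
        match h : dropToClose (pvLevel l) ls with
        | [] => ([l, body], true)
        | hd :: t =>
            let p := goB section_name body t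
            (l :: body :: "" :: hd :: p.1, true)
      else
        let p := goB section_name body ls
        (l :: p.1, p.2)
  termination_by ls => ls.length
  decreasing_by
    · have := length_dropToClose_le (pvLevel l) ls
      rw [h] at this
      simp only [List.length_cons] at this ⊢
      omega
    · simp

def update_section_py_alt (content : String) (section_name : String) (new_section_content : String) : String :=
  let lines := (PySem.Str.split? content "\n").getD []
  let body := PySem.Str.rstrip new_section_content
  let p := goB section_name body lines
  let out := if p.2 then p.1 else p.1 ++ ["", "## " ++ section_name, body]
  PySem.Str.join "\n" out

-- ===== PRECONDITION & SPEC =====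
def Spec_update_section_py (content : String) (section_name : String) (new_section_content : String) (out : String) : Prop := out = update_section_py_alt content section_name new_section_content
instance (content : String) (section_name : String) (new_section_content : String) (out : String) : Decidable (Spec_update_section_py content section_name new_section_content out) := by unfold Spec_update_section_py; infer_instance

-- ===== CLAIM (what is proved, stated in full; the proofs are below) =====
def Claim_equal_update_section_py : Prop := ∀ (content : String) (section_name : String) (new_section_content : String), Dom_update_section_py content section_name new_section_content → Spec_update_section_py content section_name new_section_content (update_section_py content section_name new_section_content)

-- ===== LEMMAS AND PROOFS =====

-- A's loop, while in_target_section holds, only skips lines until the first closing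
-- header, where it flushes the replacement block and leaves the in-target state.
theorem foldA_inTarget (sn nc : String) (ls : List String) :
    ∀ (res : List String) (found : Bool) (lvl : Nat),
      ls.foldl (stepA sn nc) (res, true, found, lvl) =
        match dropToClose lvl ls with
        | [] => (res, true, found, lvl)
        | hd :: t =>
            t.foldl (stepA sn nc)
              (res ++ [PySem.Str.rstrip nc, "", hd], false, found, lvl) := by
  induction ls with
  | nil => intro res found lvl; simp [dropToClose]
  | cons l ls ih =>
      intro res found lvl
      by_cases hc : (PySem.Str.startswith l "#" && decide (pvLevel l ≤ lvl)) = true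
      · obtain ⟨h1, h2⟩ := Bool.and_eq_true _ _ ▸ hc
        have h1' : PySem.Chars.startswith l.toList ['#'] = true := by simpa using h1
        have h2' : pvLevel l ≤ lvl := by simpa using h2
        simp only [List.foldl_cons, dropToClose, hc, if_pos]
        simp [stepA, h1', h2']
      · have hstep : stepA sn nc (res, true, found, lvl) l = (res, true, found, lvl) := by
          by_cases h1 : PySem.Str.startswith l "#" = true
          · have h2 : ¬ pvLevel l ≤ lvl := fun h => hc (by rw [h1]; simpa using h)
            have h1' : PySem.Chars.startswith l.toList ['#'] = true := by simpa using h1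
            simp [stepA, h1', h2]
          · have h1' : PySem.Chars.startswith l.toList ['#'] = false := by
              simpa using (Bool.not_eq_true _).mp h1
            simp [stepA, h1']
        simp only [List.foldl_cons, dropToClose, hc, if_neg, Bool.not_eq_true, hstep]
        exact ih res found lvl

-- equation lemmas for goB's dependent match on dropToClose
theorem goB_match_nil (sn body l : String) (ls : List String)
    (hm : (PySem.Str.startswith l "#" && pvMatch l sn) = true)
    (hdrop : dropToClose (pvLevel l) ls = []) :
    goB sn body (l :: ls) = ([l, body], true) := by
  rw [goB]
  simp only [hm, if_pos]
  split <;> simp_all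

theorem goB_match_cons (sn body l : String) (ls : List String) (hd : String) (t : List String)
    (hm : (PySem.Str.startswith l "#" && pvMatch l sn) = true)
    (hdrop : dropToClose (pvLevel l) ls = hd :: t) :
    goB sn body (l :: ls) = (l :: body :: "" :: hd :: (goB sn body t).1, true) := by
  rw [goB]
  simp only [hm, if_pos]
  split
  · simp_all
  · rename_i hd' t' h
    rw [hdrop] at h
    cases h
    rfl

-- Main invariant: A's loop started outside the target section, followed by A's
-- end-of-content fixup, produces exactly res ++ B's output, and A's found flag is
-- the disjunction of the incoming flag with B's.
theorem foldA_eq_goB (sn nc : String) :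
    ∀ (n : Nat) (lines : List String), lines.length ≤ n →
      ∀ (res : List String) (found : Bool) (lvl0 : Nat),
        (let st := lines.foldl (stepA sn nc) (res, false, found, lvl0)
         ((if st.2.1 then st.1 ++ [PySem.Str.rstrip nc] else st.1), st.2.2.1)) =
          (res ++ (goB sn (PySem.Str.rstrip nc) lines).1,
           found || (goB sn (PySem.Str.rstrip nc) lines).2) := by
  intro n
  induction n with
  | zero =>
      intro lines hlen res found lvl0
      have : lines = [] := List.length_eq_zero_iff.mp (Nat.le_zero.mp hlen)
      subst this
      simp [goB]
  | succ n ih =>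
      intro lines hlen res found lvl0
      match lines with
      | [] => simp [goB]
      | l :: ls =>
        have hls : ls.length ≤ n := by
          simpa using Nat.lt_succ_iff.mp (Nat.lt_of_lt_of_le (by simp) hlen)
        by_cases hm : (PySem.Str.startswith l "#" && pvMatch l sn) = true
        · obtain ⟨h1, h2⟩ := Bool.and_eq_true _ _ ▸ hm
          have h1' : PySem.Chars.startswith l.toList ['#'] = true := by simpa using h1
          have hstep : stepA sn nc (res, false, found, lvl0) l =
              (res ++ [l], true, true, pvLevel l) := by
            simp [stepA, h1', h2]
          rw [List.foldl_cons, hstep, foldA_inTarget]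
          rcases hdrop : dropToClose (pvLevel l) ls with _ | ⟨hd, t⟩
          · rw [goB_match_nil sn _ l ls hm hdrop]
            simp
          · have ht : t.length ≤ n := by
              have := length_dropToClose_le (pvLevel l) ls
              rw [hdrop] at this
              simp only [List.length_cons] at this
              omega
            rw [ih t ht, goB_match_cons sn _ l ls hd t hm hdrop]
            simp
        · have hstep : stepA sn nc (res, false, found, lvl0) l =
              (res ++ [l], false, found, lvl0) := by
            by_cases h1 : PySem.Str.startswith l "#" = true
            · have h2 : pvMatch l sn = false := by
                cases h : pvMatch l sn
                · rfl
                · exact absurd (by rw [h1, h]; rfl) hm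
              have h1' : PySem.Chars.startswith l.toList ['#'] = true := by simpa using h1
              simp [stepA, h1', h2]
            · have h1' : PySem.Chars.startswith l.toList ['#'] = false := by
                simpa using (Bool.not_eq_true _).mp h1
              simp [stepA, h1']
          rw [List.foldl_cons, hstep, ih ls hls]
          simp only [goB, hm, if_neg, Bool.not_eq_true]
          simp

-- ===== VERDICT (by name: the statement is the Claim_ definition above) =====
theorem update_section_py_spec : Claim_equal_update_section_py := by
  intro content sn nc _
  unfold Spec_update_section_py update_section_py update_section_py_alt
  have h := foldA_eq_goB sn nc ((PySem.Str.split? content "\n").getD []).length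
    ((PySem.Str.split? content "\n").getD []) (Nat.le_refl _) [] false 0
  simp only [List.nil_append, Bool.false_or] at h
  have h1 := congrArg Prod.fst h
  have h2 := congrArg Prod.snd h
  simp only at h1 h2
  simp only [h1, h2]
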